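-- pv_equiv track=rewrite | github.com/ChrisFJensen/Uge2 | Delopgave_1/Delopgave_1.py | word_length_counter
-- ===== SOURCE A (Python) =====
-- def word_length_counter(data: list):
--     #Convert to list of name lengths
--     data_name_length = [int(len(line)) for line in data]
--     #Create empty dict to store count for each name length
--     lenght_dict = {}
--     # Count how many times a length appears
--     for length in data_name_length:
--         if length in lenght_dict:
--             lenght_dict[length] += 1
--         else:
--             lenght_dict[length] = 1
--     return lenght_dict
-- ===== SOURCE B (Python) =====
-- def word_length_counter(data: list):
--     # Two-pass: distinct lengths in first-occurrence order, then count each.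
--     lengths = [len(line) for line in data]
--     return {L: lengths.count(L) for L in dict.fromkeys(lengths)}
-- ===== Notes on version B (the rewrite author's own statement) =====
-- stated objective: alternative
-- what changed: Replaced the incremental dict-counting loop with a two-pass scheme: dedup the length list (first-occurrence order) and count each distinct length with list.count.
import Mathlib
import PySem

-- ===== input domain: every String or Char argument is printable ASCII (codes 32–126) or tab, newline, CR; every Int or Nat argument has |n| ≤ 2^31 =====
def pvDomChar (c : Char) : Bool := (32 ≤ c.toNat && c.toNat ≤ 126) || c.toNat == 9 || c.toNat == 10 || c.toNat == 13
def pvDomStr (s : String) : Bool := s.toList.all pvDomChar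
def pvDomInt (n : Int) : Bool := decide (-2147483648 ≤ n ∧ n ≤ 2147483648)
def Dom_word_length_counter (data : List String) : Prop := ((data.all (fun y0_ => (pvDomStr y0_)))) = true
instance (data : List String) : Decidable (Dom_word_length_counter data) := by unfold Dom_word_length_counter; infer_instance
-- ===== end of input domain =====

-- B replaces A's incremental dict-counting loop with a two-pass dedup-then-count scheme (alternative decomposition, same results).


-- ===== PORT A =====
-- for each length: if already a key, increment; else store 1; return the dict (as its items list)
def word_length_counter (data : List String) : List (Int × Int) :=
  let data_name_length : List Int := data.map (fun line => PySem.Str.len line)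
  let lenght_dict : PySem.Dict Int Int :=
    data_name_length.foldl
      (fun d length =>
        if d.contains length then d.insert length (d.getD length 0 + 1)
        else d.insert length 1)
      PySem.Dict.empty
  lenght_dict.items

-- ===== PORT B =====
-- distinct lengths in first-occurrence order (dict.fromkeys), each paired with its count
def word_length_counter_alt (data : List String) : List (Int × Int) :=
  let lengths : List Int := data.map (fun line => PySem.Str.len line)
  (PySem.List.dedup lengths).map (fun L => (L, (lengths.count L : Int)))

-- ===== PRECONDITION & SPEC =====
def Spec_word_length_counter (data : List String) (out : List (Int × Int)) : Prop := out = word_length_counter_alt data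
instance (data : List String) (out : List (Int × Int)) : Decidable (Spec_word_length_counter data out) := by unfold Spec_word_length_counter; infer_instance

-- ===== CLAIM (what is proved, stated in full; the proofs are below) =====
def Claim_equal_word_length_counter : Prop := ∀ (data : List String), Dom_word_length_counter data → Spec_word_length_counter data (word_length_counter data)

-- ===== LEMMAS AND PROOFS =====
-- A's branching step is the standard insert-increment step: on a fresh key getD gives 0.
lemma wlc_step_eq :
    (fun (d : PySem.Dict Int Int) (length : Int) =>
        if d.contains length then d.insert length (d.getD length 0 + 1)
        else d.insert length 1)
      = fun d length => d.insert length (d.getD length 0 + 1) := by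
  funext d length
  by_cases h : d.contains length = true
  · simp [h]
  · simp only [Bool.not_eq_true] at h
    rw [if_neg (by simp [h]), PySem.Dict.getD_of_not_contains (h := h), zero_add]

-- ===== VERDICT (by name: the statement is the Claim_ definition above) =====
theorem word_length_counter_spec : Claim_equal_word_length_counter := by
  intro data _
  show word_length_counter data = word_length_counter_alt data
  simp only [word_length_counter, word_length_counter_alt]
  rw [wlc_step_eq, PySem.Dict.foldl_insert_getD_add_one_eq_counter,
      PySem.Dict.items_counter, PySem.List.dedup_eq_ofList]
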